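-- pv_equiv track=rewrite | github.com/smartprasad2001-cyber/MIID | maximize_orthographic_similarity.py | _apply_consonant_swap
-- ===== SOURCE A (Python) =====
-- from typing import List, Set, Tuple, Dict, Optional, Any
--
-- def _apply_consonant_swap(word: str, max_variations: int = 50) -> Set[str]:
--     """Generate variations by swapping adjacent consonants."""
--     variations = set()
--     vowels = "aeiou"
--     word_lower = word.lower()
--
--     for i in range(len(word) - 1):
--         char1 = word_lower[i]
--         char2 = word_lower[i+1]
--
--         # Check if both are different consonants
--         if (char1.isalpha() and char1 not in vowels and
--             char2.isalpha() and char2 not in vowels and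
--             char1 != char2):
--
--             # Swap them
--             new_word = word[:i] + word[i+1] + word[i] + word[i+2:]
--             if new_word != word:
--                 variations.add(new_word)
--                 if len(variations) >= max_variations:
--                     break
--
--     return variations
-- ===== SOURCE B (Python) =====
-- def _apply_consonant_swap(word: str, max_variations: int = 50):
--     """Generate variations by swapping adjacent distinct consonants.
--
--     Zipper walk over the string (no index arithmetic): the word is split into a
--     growing prefix and a shrinking rest; each step rebuilds the swapped word from
--     them, then the ordered-unique results are truncated to the cap.
--     """
--     def is_consonant(c):
--         return c.isalpha() and c.lower() not in "aeiou"
--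
--     results = []
--     prefix = ""
--     rest = word
--     while len(rest) >= 2:
--         c1, c2 = rest[0], rest[1]
--         if is_consonant(c1) and is_consonant(c2) and c1.lower() != c2.lower():
--             results.append(prefix + c2 + c1 + rest[2:])
--         prefix += c1
--         rest = rest[1:]
--
--     uniq = list(dict.fromkeys(results))
--     return set(uniq[:max(max_variations, 0)])
-- ===== Notes on version B (the rewrite author's own statement) =====
-- stated objective: alternative
-- what changed: B replaces A's indexed loop with slicing and an incremental capped set by an iterative zipper walk (growing prefix / shrinking rest, no index arithmetic or slicing) that emits every adjacent distinct-consonant swap, followed by an ordered dedup via dict.fromkeys and a truncation to the cap.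
-- intended difference: For max_variations <= 0 on a word containing an adjacent pair of distinct consonants, A still returns a one-element set (it checks the cap only after inserting), while B returns the empty set, which is the intended meaning of a nonpositive cap. — e.g. on _apply_consonant_swap("bc", 0): A returns ["cb"], B returns []
import Mathlib
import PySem

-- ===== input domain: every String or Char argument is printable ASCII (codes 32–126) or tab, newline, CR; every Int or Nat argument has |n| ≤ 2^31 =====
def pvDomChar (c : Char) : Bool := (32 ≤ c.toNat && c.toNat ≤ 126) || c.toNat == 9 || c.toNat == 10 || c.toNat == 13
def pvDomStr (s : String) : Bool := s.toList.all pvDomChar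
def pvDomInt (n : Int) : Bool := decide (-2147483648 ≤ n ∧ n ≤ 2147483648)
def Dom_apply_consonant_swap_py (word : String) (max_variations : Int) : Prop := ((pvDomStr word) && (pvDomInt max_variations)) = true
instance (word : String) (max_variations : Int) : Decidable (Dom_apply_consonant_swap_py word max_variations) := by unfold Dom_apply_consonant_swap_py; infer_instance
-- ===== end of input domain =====

-- B walks the string as an iterative zipper (growing prefix / shrinking rest, no indices or
-- slicing), emitting every adjacent distinct-consonant swap, then deduplicates in order and
-- truncates to the cap, instead of A's indexed loop with an incremental capped set
-- (objective: alternative).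

-- ===== PORT A =====
-- the vowel string "aeiou" as a character list
def pvVowelsA : List Char := ['a', 'e', 'i', 'o', 'u']

-- A's 'for i in range(len(word)-1): … break' as structural recursion on the index list;
-- indexing word[i], word[i+1], word_lower[i], word_lower[i+1] is always in range for these i,
-- so the pyGetD default ' ' is never used (exact)
def pvSwapLoopA (cs wl : List Char) (max_variations : Int) :
    List Int → PySem.Set String → PySem.Set String
  | [], variations => variations
  | i :: rest, variations =>
    let char1 := PySem.List.pyGetD wl i ' '
    let char2 := PySem.List.pyGetD wl (i + 1) ' '
    if PySem.Chars.isalpha char1 && !(pvVowelsA.contains char1) &&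
       PySem.Chars.isalpha char2 && !(pvVowelsA.contains char2) &&
       char1 != char2 then
      let new_word := String.ofList (PySem.List.slice cs none (some i) ++
        [PySem.List.pyGetD cs (i + 1) ' ', PySem.List.pyGetD cs i ' '] ++
        PySem.List.slice cs (some (i + 2)) none)
      if new_word ≠ String.ofList cs then
        let variations' := PySem.Set.add variations new_word
        if max_variations ≤ PySem.Set.len variations' then variations'
        else pvSwapLoopA cs wl max_variations rest variations'
      else pvSwapLoopA cs wl max_variations rest variations
    else pvSwapLoopA cs wl max_variations rest variations

def apply_consonant_swap_py (word : String) (max_variations : Int) : List String :=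
  let word_lower := (PySem.Str.lower word).toList
  pvSwapLoopA word.toList word_lower max_variations
    (PySem.List.pyRange 0 (PySem.Str.len word - 1) 1) PySem.Set.empty

-- ===== PORT B =====
-- Source B's is_consonant(c): c.isalpha() and c.lower() not in "aeiou"
def pvIsConsB (c : Char) : Bool :=
  PySem.Chars.isalpha c && !("aeiou".toList.contains (PySem.Chars.lowerChar c))

-- Source B's while loop: zipper state (prefix, rest, results); prefix grows, rest shrinks
def pvWalkB : List Char → List Char → List String → List String
  | pre, c1 :: c2 :: rest, results =>
    pvWalkB (pre ++ [c1]) (c2 :: rest)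
      (if pvIsConsB c1 && pvIsConsB c2 &&
          (PySem.Chars.lowerChar c1 != PySem.Chars.lowerChar c2) then
        results ++ [String.ofList (pre ++ c2 :: c1 :: rest)]
      else results)
  | _, _, results => results

-- Source B's dict.fromkeys dedup (PySem.List.dedup), then uniq[:max(mv,0)]
def apply_consonant_swap_py_alt (word : String) (max_variations : Int) : List String :=
  (PySem.List.dedup (pvWalkB [] word.toList [])).take (max max_variations 0).toNat

-- ===== PRECONDITION & SPEC =====
-- For max_variations <= 0 on a word containing an adjacent pair of distinct consonants, A still
-- returns a one-element set (it checks the cap only after inserting), while B returns the empty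
-- set, which is the intended meaning of a nonpositive cap.
def D_apply_consonant_swap_py (word : String) (max_variations : Int) : Prop :=
  max_variations ≤ 0 ∧ ∃ p ∈ word.toList.zip word.toList.tail,
    PySem.Chars.lowerChar p.1 ≠ PySem.Chars.lowerChar p.2 ∧
    ∀ c ∈ [PySem.Chars.lowerChar p.1, PySem.Chars.lowerChar p.2],
      'a' ≤ c ∧ c ≤ 'z' ∧ c ∉ "aeiou".toList
instance (word : String) (max_variations : Int) : Decidable (D_apply_consonant_swap_py word max_variations) := by unfold D_apply_consonant_swap_py; infer_instance

def Spec_apply_consonant_swap_py (word : String) (max_variations : Int) (out : List String) : Prop := ¬ D_apply_consonant_swap_py word max_variations → out = apply_consonant_swap_py_alt word max_variations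
instance (word : String) (max_variations : Int) (out : List String) : Decidable (Spec_apply_consonant_swap_py word max_variations out) := by unfold Spec_apply_consonant_swap_py; infer_instance

def pvDiffWitness_apply_consonant_swap_py : String × Int := ("bc", 0)
def pvDiffWitnessOut_apply_consonant_swap_py : (List String) × (List String) := (["cb"], [])

-- ===== CLAIM (what is proved, stated in full; the proofs are below) =====
def Claim_unchanged_apply_consonant_swap_py : Prop := ∀ (word : String) (max_variations : Int), Dom_apply_consonant_swap_py word max_variations → Spec_apply_consonant_swap_py word max_variations (apply_consonant_swap_py word max_variations)
def Claim_changed_apply_consonant_swap_py : Prop := Dom_apply_consonant_swap_py (pvDiffWitness_apply_consonant_swap_py.1) (pvDiffWitness_apply_consonant_swap_py.2) ∧ D_apply_consonant_swap_py (pvDiffWitness_apply_consonant_swap_py.1) (pvDiffWitness_apply_consonant_swap_py.2) ∧ apply_consonant_swap_py (pvDiffWitness_apply_consonant_swap_py.1) (pvDiffWitness_apply_consonant_swap_py.2) = pvDiffWitnessOut_apply_consonant_swap_py.1 ∧ apply_consonant_swap_py_alt (pvDiffWitness_apply_consonant_swap_py.1) (pvDiffWitness_apply_consonant_swap_py.2)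 = pvDiffWitnessOut_apply_consonant_swap_py.2 ∧ pvDiffWitnessOut_apply_consonant_swap_py.1 ≠ pvDiffWitnessOut_apply_consonant_swap_py.2
def Claim_exact_apply_consonant_swap_py : Prop := ∀ (word : String) (max_variations : Int), Dom_apply_consonant_swap_py word max_variations → D_apply_consonant_swap_py word max_variations → apply_consonant_swap_py word max_variations ≠ apply_consonant_swap_py_alt word max_variations

-- ===== LEMMAS AND PROOFS =====

-- A's guard on already-lowered chars, as a predicate (proof-side normal form)
def pvIsConsonantB (c : Char) : Bool :=
  PySem.Chars.isalpha c && !("aeiou".toList.contains c)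

-- one candidate at index i: the swapped word, if the guard holds (proof-side normal form)
def pvCandB (cs wl : List Char) (i : Int) : Option String :=
  if pvIsConsonantB (PySem.List.pyGetD wl i ' ') &&
     pvIsConsonantB (PySem.List.pyGetD wl (i + 1) ' ') &&
     PySem.List.pyGetD wl i ' ' != PySem.List.pyGetD wl (i + 1) ' ' then
    some (String.ofList (PySem.List.slice cs none (some i) ++
      [PySem.List.pyGetD cs (i + 1) ' ', PySem.List.pyGetD cs i ' '] ++
      PySem.List.slice cs (some (i + 2)) none))
  else none

-- A's loop over candidate STRINGS (indices abstracted away)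
def pvSLoop (mv : Int) : List String → PySem.Set String → PySem.Set String
  | [], s => s
  | x :: xs, s =>
    let s' := PySem.Set.add s x
    if mv ≤ PySem.Set.len s' then s' else pvSLoop mv xs s'

-- lowering a character preserves isalpha
theorem pv_isalpha_lower (c : Char) :
    PySem.Chars.isalpha (PySem.Chars.lowerChar c) = PySem.Chars.isalpha c := by
  simp only [PySem.Chars.isalpha, PySem.Chars.lowerChar]
  split_ifs with h
  · have h' : 65 ≤ c.toNat ∧ c.toNat ≤ 90 := by
      simp only [PySem.Chars.isupper, Bool.and_eq_true, decide_eq_true_eq, Char.le_def] at h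
      exact ⟨h.1, h.2⟩
    have hd : (Char.ofNat (c.toNat + 32)).toNat = c.toNat + 32 := by
      rw [Char.toNat_ofNat, if_pos (by left; omega)]
    have hl : PySem.Chars.islower (Char.ofNat (c.toNat + 32)) = true := by
      simp only [PySem.Chars.islower, Bool.and_eq_true, decide_eq_true_eq, Char.le_def]
      constructor
      · show 'a'.toNat ≤ (Char.ofNat (c.toNat + 32)).toNat
        rw [hd]; have : 'a'.toNat = 97 := rfl; omega
      · show (Char.ofNat (c.toNat + 32)).toNat ≤ 'z'.toNat
        rw [hd]; have : 'z'.toNat = 122 := rfl; omega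
    rw [hl, h]; simp
  · rfl

-- B's raw-char consonant test equals A's test on the lowered char
theorem pv_cons_eq (c : Char) :
    pvIsConsB c = pvIsConsonantB (PySem.Chars.lowerChar c) := by
  simp only [pvIsConsB, pvIsConsonantB, pv_isalpha_lower]

-- boolean adjacent-pair scan over the lowered word (proof-side form of the D_ condition)
def pvHasPairD : List Char → Bool
  | c1 :: c2 :: rest =>
    (PySem.Chars.isalpha c1 && !(pvVowelsA.contains c1) &&
     PySem.Chars.isalpha c2 && !(pvVowelsA.contains c2) &&
     c1 != c2) || pvHasPairD (c2 :: rest)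
  | _ => false

theorem pv_char_le_iff (a b : Char) : a ≤ b ↔ a.toNat ≤ b.toNat := by
  rw [Char.le_def, UInt32.le_iff_toNat_le]
  exact Iff.rfl

-- the lowered char is in 'a'..'z' exactly when the raw char is alphabetic
theorem pv_lower_alpha (c : Char) :
    ('a' ≤ PySem.Chars.lowerChar c ∧ PySem.Chars.lowerChar c ≤ 'z')
      ↔ PySem.Chars.isalpha c = true := by
  have ha : ('a' : Char).toNat = 97 := rfl
  have hz : ('z' : Char).toNat = 122 := rfl
  rw [pv_char_le_iff, pv_char_le_iff, ha, hz]
  simp only [PySem.Chars.isalpha, PySem.Chars.lowerChar, Bool.or_eq_true]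
  by_cases h : PySem.Chars.isupper c = true
  · rw [if_pos h]
    have h' : 65 ≤ c.toNat ∧ c.toNat ≤ 90 := by
      simp only [PySem.Chars.isupper, Bool.and_eq_true, decide_eq_true_eq, pv_char_le_iff] at h
      have hA : ('A' : Char).toNat = 65 := rfl
      have hZ : ('Z' : Char).toNat = 90 := rfl
      omega
    have hd : (Char.ofNat (c.toNat + 32)).toNat = c.toNat + 32 := by
      rw [Char.toNat_ofNat, if_pos (by left; omega)]
    rw [hd]
    constructor
    · intro _; exact Or.inl h
    · intro _; omega
  · rw [if_neg h]
    rw [Bool.not_eq_true] at h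
    rw [h]
    simp only [Bool.false_eq_true, false_or, PySem.Chars.islower, Bool.and_eq_true,
      decide_eq_true_eq, pv_char_le_iff, ha, hz]

-- D_'s existential over zipped pairs is the boolean scan over the lowered word
theorem pv_D_iff (l : List Char) :
    (∃ p ∈ l.zip l.tail,
      PySem.Chars.lowerChar p.1 ≠ PySem.Chars.lowerChar p.2 ∧
      ∀ c ∈ [PySem.Chars.lowerChar p.1, PySem.Chars.lowerChar p.2],
        'a' ≤ c ∧ c ≤ 'z' ∧ c ∉ "aeiou".toList)
    ↔ pvHasPairD (PySem.Chars.lower l) = true := by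
  induction l with
  | nil => simp [PySem.Chars.lower, pvHasPairD]
  | cons c1 tl ih =>
    cases tl with
    | nil => simp [PySem.Chars.lower, pvHasPairD]
    | cons c2 rest =>
      have hstep : PySem.Chars.lower (c1 :: c2 :: rest)
          = PySem.Chars.lowerChar c1 :: PySem.Chars.lower (c2 :: rest) := rfl
      have hstep2 : PySem.Chars.lower (c2 :: rest)
          = PySem.Chars.lowerChar c2 :: PySem.Chars.lower rest := rfl
      rw [hstep, hstep2, pvHasPairD, ← hstep2, Bool.or_eq_true, ← ih]
      have hhead : (PySem.Chars.lowerChar c1 ≠ PySem.Chars.lowerChar c2 ∧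
          ∀ c ∈ [PySem.Chars.lowerChar c1, PySem.Chars.lowerChar c2],
            'a' ≤ c ∧ c ≤ 'z' ∧ c ∉ "aeiou".toList)
          ↔ (PySem.Chars.isalpha (PySem.Chars.lowerChar c1) &&
             !(pvVowelsA.contains (PySem.Chars.lowerChar c1)) &&
             PySem.Chars.isalpha (PySem.Chars.lowerChar c2) &&
             !(pvVowelsA.contains (PySem.Chars.lowerChar c2)) &&
             (PySem.Chars.lowerChar c1 != PySem.Chars.lowerChar c2)) = true := by
        rw [show ("aeiou".toList : List Char) = pvVowelsA from rfl]
        simp only [List.forall_mem_cons, List.forall_mem_nil, and_true,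
          Bool.and_eq_true, Bool.not_eq_eq_eq_not, Bool.not_true, bne_iff_ne,
          pv_isalpha_lower, List.contains_eq_mem, Bool.eq_false_iff, ne_eq,
          decide_eq_true_eq]
        constructor
        · rintro ⟨hne, ⟨ha1, hz1, hv1⟩, ⟨ha2, hz2, hv2⟩, -⟩
          exact ⟨⟨⟨⟨(pv_lower_alpha c1).mp ⟨ha1, hz1⟩, hv1⟩,
            (pv_lower_alpha c2).mp ⟨ha2, hz2⟩⟩, hv2⟩, hne⟩
        · rintro ⟨⟨⟨⟨ha1, hv1⟩, ha2⟩, hv2⟩, hne⟩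
          obtain ⟨hal1, hzl1⟩ := (pv_lower_alpha c1).mpr ha1
          obtain ⟨hal2, hzl2⟩ := (pv_lower_alpha c2).mpr ha2
          exact ⟨hne, ⟨hal1, hzl1, hv1⟩, ⟨hal2, hzl2, hv2⟩, by simp⟩
      constructor
      · rintro ⟨p, hp, hP⟩
        rcases List.mem_cons.mp hp with h | h
        · subst h; exact Or.inl (hhead.mp hP)
        · exact Or.inr ⟨p, h, hP⟩
      · rintro (h | ⟨p, hp, hP⟩)
        · exact ⟨(c1, c2), by simp, hhead.mpr h⟩
        · exact ⟨p, List.mem_cons_of_mem _ hp, hP⟩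

-- A's guard equals the conjunction of pvIsConsonantB tests
theorem pv_cond_eq (c1 c2 : Char) :
    (PySem.Chars.isalpha c1 && !(pvVowelsA.contains c1) &&
     PySem.Chars.isalpha c2 && !(pvVowelsA.contains c2) && (c1 != c2))
    = (pvIsConsonantB c1 && pvIsConsonantB c2 && (c1 != c2)) := by
  show _ = (PySem.Chars.isalpha c1 && !(pvVowelsA.contains c1) &&
      (PySem.Chars.isalpha c2 && !(pvVowelsA.contains c2)) && (c1 != c2))
  simp [Bool.and_assoc]

-- the swapped word differs from the original (distinct lowered chars ⇒ distinct chars)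
theorem pv_swap_ne (cs : List Char) (j : Nat) (hj : j + 1 < cs.length)
    (hne : cs[j] ≠ cs[j + 1]) :
    List.take j cs ++ [cs[j + 1], cs[j]] ++ List.drop (j + 2) cs ≠ cs := by
  intro h
  rw [List.append_assoc] at h
  have h2 := congrArg (List.drop j) h
  rw [List.drop_left' (by rw [List.length_take]; omega)] at h2
  rw [List.drop_eq_getElem_cons (l := cs) (by omega : j < cs.length)] at h2
  rw [List.drop_eq_getElem_cons (l := cs) (by omega : j + 1 < cs.length)] at h2
  simp only [List.cons_append, List.nil_append, List.cons.injEq] at h2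
  exact hne h2.1.symm

theorem pv_set_add_len {s : PySem.Set String} {x : String} :
    PySem.Set.add s x = s ∨ (PySem.Set.add s x = s ++ [x] ∧ (PySem.Set.add s x).length = s.length + 1) := by
  by_cases h : x ∈ s
  · left; simp [PySem.Set.add, List.contains_iff_mem, h]
  · right; simp [PySem.Set.add, List.contains_iff_mem, h]

theorem pv_update_cons (s : PySem.Set String) (x : String) (xs : List String) :
    PySem.Set.update s (x :: xs) = PySem.Set.update (PySem.Set.add s x) xs := rfl

theorem pv_update_prefix {s : PySem.Set String} (xs : List String) :
    ∃ t, PySem.Set.update s xs = s ++ t := by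
  induction xs generalizing s with
  | nil => exact ⟨[], by simp [PySem.Set.update]⟩
  | cons x xs ih =>
    rcases ih (s := PySem.Set.add s x) with ⟨t, ht⟩
    rw [pv_update_cons]
    rcases pv_set_add_len (s := s) (x := x) with h | ⟨h, _⟩
    · exact ⟨t, by rw [ht, h]⟩
    · exact ⟨[x] ++ t, by rw [ht, h]; simp⟩

-- the break-at-cap loop is take-after-dedup
theorem pv_sloop_eq (mv : Int) (xs : List String) (s : PySem.Set String)
    (hs : PySem.Set.len s < mv) :
    pvSLoop mv xs s = (PySem.Set.update s xs).take mv.toNat := by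
  induction xs generalizing s with
  | nil =>
    show s = (PySem.Set.update s []).take mv.toNat
    rw [show PySem.Set.update s [] = s from rfl]
    rw [List.take_of_length_le]
    simp [PySem.Set.len] at hs; omega
  | cons x xs ih =>
    simp only [pvSLoop]
    rw [pv_update_cons]
    by_cases hb : mv ≤ PySem.Set.len (PySem.Set.add s x)
    · rw [if_pos hb]
      rcases pv_set_add_len (s := s) (x := x) with h | ⟨h, hlen⟩
      · rw [h] at hb; omega
      · rcases pv_update_prefix (s := PySem.Set.add s x) xs with ⟨t, ht⟩
        rw [ht]
        refine (List.take_left' ?_).symm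
        simp [PySem.Set.len] at hs hb
        omega
    · rw [if_neg hb, ih _ (by omega)]

-- A's index loop equals pvSLoop over the filterMap candidate list
theorem pv_aloop_eq (cs : List Char) (mv : Int) (idxs : List Int)
    (hidx : ∀ i ∈ idxs, 0 ≤ i ∧ i + 1 < (cs.length : Int)) (s : PySem.Set String) :
    pvSwapLoopA cs (PySem.Chars.lower cs) mv idxs s
      = pvSLoop mv (idxs.filterMap (pvCandB cs (PySem.Chars.lower cs))) s := by
  induction idxs generalizing s with
  | nil => rfl
  | cons i rest ih =>
    have hi := hidx i (by simp)
    have hrest : ∀ j ∈ rest, 0 ≤ j ∧ j + 1 < (cs.length : Int) :=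
      fun j hj => hidx j (by simp [hj])
    set wl := PySem.Chars.lower cs with hwl
    have hlen : wl.length = cs.length := by simp [hwl, PySem.Chars.lower]
    have h0 : (0 : Int) ≤ i := hi.1
    have h1 : i < (wl.length : Int) := by omega
    have h2 : (0 : Int) ≤ i + 1 := by omega
    have h3 : i + 1 < (wl.length : Int) := by omega
    have g1 : PySem.List.pyGetD wl i ' ' = wl[i.toNat]'(by omega) :=
      PySem.List.pyGetD_eq_getElem wl ' ' h0 h1
    have g2 : PySem.List.pyGetD wl (i + 1) ' ' = wl[i.toNat + 1]'(by omega) := by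
      rw [PySem.List.pyGetD_eq_getElem wl ' ' h2 h3]
      congr 1; omega
    simp only [pvSwapLoopA, List.filterMap_cons, pvCandB, pv_cond_eq]
    by_cases hc : (pvIsConsonantB (PySem.List.pyGetD wl i ' ') &&
        pvIsConsonantB (PySem.List.pyGetD wl (i + 1) ' ') &&
        (PySem.List.pyGetD wl i ' ' != PySem.List.pyGetD wl (i + 1) ' ')) = true
    · rw [if_pos hc, if_pos hc]
      have hcne : wl[i.toNat]'(by omega) ≠ wl[i.toNat + 1]'(by omega) := by
        have := (Bool.and_eq_true _ _).mp hc |>.2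
        rw [g1, g2] at this
        simpa using this
      have hcsne : cs[i.toNat]'(by omega) ≠ cs[i.toNat + 1]'(by omega) := by
        intro h
        apply hcne
        simp only [hwl, PySem.Chars.lower, List.getElem_map]
        rw [h]
      have hg1 : PySem.List.pyGetD cs i ' ' = cs[i.toNat]'(by omega) :=
        PySem.List.pyGetD_eq_getElem cs ' ' h0 (by omega)
      have hg2 : PySem.List.pyGetD cs (i + 1) ' ' = cs[i.toNat + 1]'(by omega) := by
        rw [PySem.List.pyGetD_eq_getElem cs ' ' h2 (by omega)]
        congr 1; omega
      have hs1 : PySem.List.slice cs none (some i) = List.take i.toNat cs :=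
        PySem.List.slice_to cs h0
      have hs2 : PySem.List.slice cs (some (i + 2)) none = List.drop (i.toNat + 2) cs := by
        rw [PySem.List.slice_from cs (by omega)]
        congr 1; omega
      have hne : String.ofList (PySem.List.slice cs none (some i) ++
          [PySem.List.pyGetD cs (i + 1) ' ', PySem.List.pyGetD cs i ' '] ++
          PySem.List.slice cs (some (i + 2)) none) ≠ String.ofList cs := by
        rw [hs1, hs2, hg1, hg2]
        intro h
        exact pv_swap_ne cs i.toNat (by omega) hcsne (String.ofList_inj.mp h)
      rw [if_pos hne]
      simp only [pvSLoop]
      by_cases hb : mv ≤ PySem.Set.len (PySem.Set.add s (String.ofList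
          (PySem.List.slice cs none (some i) ++
            [PySem.List.pyGetD cs (i + 1) ' ', PySem.List.pyGetD cs i ' '] ++
            PySem.List.slice cs (some (i + 2)) none)))
      · rw [if_pos hb, if_pos hb]
      · rw [if_neg hb, if_neg hb, ih hrest]
        rfl
    · rw [if_neg hc, if_neg hc, ih hrest]
      rfl

-- proof-side plain form of the walk (results of the remaining steps, no accumulator)
def pvWalkP : List Char → List Char → List String
  | pre, c1 :: c2 :: rest =>
    (if pvIsConsB c1 && pvIsConsB c2 &&
        (PySem.Chars.lowerChar c1 != PySem.Chars.lowerChar c2) then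
       [String.ofList (pre ++ c2 :: c1 :: rest)]
     else []) ++ pvWalkP (pre ++ [c1]) (c2 :: rest)
  | _, _ => []

-- the accumulator loop is the plain walk appended to the accumulator
theorem pv_walk_acc : ∀ (n : Nat) (rest pre : List Char) (acc : List String),
    rest.length = n → pvWalkB pre rest acc = acc ++ pvWalkP pre rest := by
  intro n
  induction n with
  | zero =>
    intro rest pre acc hn
    rw [List.length_eq_zero_iff] at hn
    subst hn
    simp [pvWalkB, pvWalkP]
  | succ n ih =>
    intro rest pre acc hn
    rcases rest with _ | ⟨c1, _ | ⟨c2, rest⟩⟩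
    · simp at hn
    · simp [pvWalkB, pvWalkP]
    · rw [pvWalkB, pvWalkP]
      rw [ih (c2 :: rest) _ _ (by simpa using hn)]
      by_cases hg : (pvIsConsB c1 && pvIsConsB c2 &&
          (PySem.Chars.lowerChar c1 != PySem.Chars.lowerChar c2)) = true
      · rw [if_pos hg, if_pos hg]
        simp
      · rw [if_neg hg, if_neg hg]
        simp

-- B's zipper walk produces exactly the candidate list, index-free side ↔ indexed side
theorem pv_walk_eq (cs : List Char) : ∀ (n k : Nat), cs.length - k = n → k ≤ cs.length →
    pvWalkP (cs.take k) (cs.drop k)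
      = (PySem.List.pyRange (k : Int) ((cs.length : Int) - 1) 1).filterMap
          (pvCandB cs (PySem.Chars.lower cs)) := by
  intro n
  induction n with
  | zero =>
    intro k hn hk
    have hdrop : cs.drop k = [] := by
      rw [List.drop_eq_nil_iff]; omega
    rw [hdrop, PySem.List.pyRange_one_eq_nil (by omega)]
    rfl
  | succ n ih =>
    intro k hn hk
    have hklt : k < cs.length := by omega
    rcases hd : cs.drop k with _ | ⟨c1, _ | ⟨c2, rest⟩⟩
    · rw [List.drop_eq_nil_iff] at hd; omega
    · -- only one character left: both sides empty
      have hlen1 : cs.length = k + 1 := by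
        have := congrArg List.length hd
        simp at this
        omega
      rw [PySem.List.pyRange_one_eq_nil (by omega)]
      rfl
    · have hlen2 : k + 1 < cs.length := by
        have := congrArg List.length hd
        simp at this
        omega
      rw [List.drop_eq_getElem_cons hklt] at hd
      simp only [List.cons.injEq] at hd
      obtain ⟨hc1, hd1⟩ := hd
      rw [List.drop_eq_getElem_cons hlen2] at hd1
      simp only [List.cons.injEq] at hd1
      obtain ⟨hc2, hd2⟩ := hd1
      set wl := PySem.Chars.lower cs with hwl
      have hlenw : wl.length = cs.length := by simp [hwl, PySem.Chars.lower]
      -- indexed lookups into the lowered word are lowerChar of c1 / c2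
      have g1 : PySem.List.pyGetD wl (k : Int) ' ' = PySem.Chars.lowerChar c1 := by
        rw [PySem.List.pyGetD_eq_getElem wl ' ' (by omega) (by omega)]
        simp only [hwl, PySem.Chars.lower, List.getElem_map, Int.toNat_natCast]
        rw [hc1]
      have g2 : PySem.List.pyGetD wl ((k : Int) + 1) ' ' = PySem.Chars.lowerChar c2 := by
        rw [PySem.List.pyGetD_eq_getElem wl ' ' (by omega) (by omega)]
        simp only [hwl, PySem.Chars.lower, List.getElem_map,
          show ((k : Int) + 1).toNat = k + 1 from by omega]
        rw [hc2]
      have hg1 : PySem.List.pyGetD cs (k : Int) ' ' = c1 := by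
        rw [PySem.List.pyGetD_eq_getElem cs ' ' (by omega) (by omega)]
        simpa using hc1
      have hg2 : PySem.List.pyGetD cs ((k : Int) + 1) ' ' = c2 := by
        rw [PySem.List.pyGetD_eq_getElem cs ' ' (by omega) (by omega)]
        simp only [show ((k : Int) + 1).toNat = k + 1 from by omega]
        exact hc2
      have hs1 : PySem.List.slice cs none (some (k : Int)) = cs.take k := by
        rw [PySem.List.slice_to cs (by omega)]; simp
      have hs2 : PySem.List.slice cs (some ((k : Int) + 2)) none = cs.drop (k + 2) := by
        rw [PySem.List.slice_from cs (by omega)]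
        simp only [show ((k : Int) + 2).toNat = k + 2 from by omega]
      -- unfold one step of the walk and of the range
      rw [pvWalkP]
      rw [PySem.List.pyRange_one_cons (by omega)]
      have hguard : (pvIsConsB c1 && pvIsConsB c2 &&
          (PySem.Chars.lowerChar c1 != PySem.Chars.lowerChar c2))
          = (pvIsConsonantB (PySem.List.pyGetD wl (k : Int) ' ') &&
             pvIsConsonantB (PySem.List.pyGetD wl ((k : Int) + 1) ' ') &&
             (PySem.List.pyGetD wl (k : Int) ' ' != PySem.List.pyGetD wl ((k : Int) + 1) ' ')) := by
        rw [g1, g2, pv_cons_eq c1, pv_cons_eq c2]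
      have hrec : pvWalkP (cs.take k ++ [c1]) (c2 :: rest)
          = (PySem.List.pyRange ((k : Int) + 1) ((cs.length : Int) - 1) 1).filterMap
              (pvCandB cs wl) := by
        have htake : cs.take (k + 1) = cs.take k ++ [c1] := by
          rw [List.take_add_one, List.getElem?_eq_getElem hklt, hc1]
          rfl
        have hdrop1 : cs.drop (k + 1) = c2 :: rest := by
          rw [List.drop_eq_getElem_cons hlen2, hc2, hd2]
        have := ih (k + 1) (by omega) (by omega)
        rw [htake, hdrop1] at this
        rw [this]
        norm_num
      by_cases hc : (pvIsConsonantB (PySem.List.pyGetD wl (k : Int) ' ') &&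
          pvIsConsonantB (PySem.List.pyGetD wl ((k : Int) + 1) ' ') &&
          (PySem.List.pyGetD wl (k : Int) ' ' != PySem.List.pyGetD wl ((k : Int) + 1) ' ')) = true
      · have hsome : pvCandB cs wl (k : Int) = some (String.ofList
            (PySem.List.slice cs none (some (k : Int)) ++
              [PySem.List.pyGetD cs ((k : Int) + 1) ' ', PySem.List.pyGetD cs (k : Int) ' '] ++
              PySem.List.slice cs (some ((k : Int) + 2)) none)) := by
          rw [pvCandB, if_pos hc]
        have hb : (pvIsConsB c1 && pvIsConsB c2 &&
            (PySem.Chars.lowerChar c1 != PySem.Chars.lowerChar c2)) = true := by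
          rw [hguard]; exact hc
        rw [if_pos hb, hrec]
        simp only [List.filterMap_cons, hsome, hs1, hs2, hg1, hg2]
        rw [← hd2]
        simp [List.append_assoc]
      · have hnone : pvCandB cs wl (k : Int) = none := by
          rw [pvCandB, if_neg hc]
        have hb : ¬ ((pvIsConsB c1 && pvIsConsB c2 &&
            (PySem.Chars.lowerChar c1 != PySem.Chars.lowerChar c2)) = true) := by
          rw [hguard]; exact hc
        rw [if_neg hb, hrec]
        simp only [List.filterMap_cons, hnone, List.nil_append]

-- B in pipeline normal form over the shared candidate list
theorem pv_b_eq (word : String) (mv : Int) :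
    apply_consonant_swap_py_alt word mv
      = (PySem.Set.ofList ((PySem.List.pyRange 0 (PySem.Str.len word - 1) 1).filterMap
          (pvCandB word.toList (PySem.Chars.lower word.toList)))).take (max mv 0).toNat := by
  unfold apply_consonant_swap_py_alt
  rw [pv_walk_acc word.toList.length word.toList [] [] rfl, List.nil_append]
  have h := pv_walk_eq word.toList (word.toList.length) 0 (by omega) (by omega)
  simp only [List.take_zero, List.drop_zero, Nat.cast_zero] at h
  rw [h, PySem.List.dedup_eq_ofList]
  rfl

-- A in loop normal form over the same candidate list
theorem pv_a_sloop (word : String) (mv : Int) :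
    apply_consonant_swap_py word mv
      = pvSLoop mv ((PySem.List.pyRange 0 (PySem.Str.len word - 1) 1).filterMap
          (pvCandB word.toList (PySem.Chars.lower word.toList))) PySem.Set.empty := by
  unfold apply_consonant_swap_py
  rw [PySem.Str.toList_lower]
  exact pv_aloop_eq word.toList mv _ (fun i hi => by
    rw [PySem.List.mem_pyRange_one] at hi
    have : PySem.Str.len word = (word.toList.length : Int) := rfl
    omega) PySem.Set.empty

-- A as take-after-dedup of the candidate list (the shared normal form)
theorem pv_a_eq (word : String) (mv : Int) (hmv : 1 ≤ mv) :
    apply_consonant_swap_py word mv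
      = (PySem.Set.ofList ((PySem.List.pyRange 0 (PySem.Str.len word - 1) 1).filterMap
          (pvCandB word.toList (PySem.Chars.lower word.toList)))).take mv.toNat := by
  rw [pv_a_sloop]
  rw [pv_sloop_eq mv _ _ (by simp [PySem.Set.len, PySem.Set.empty]; omega)]
  rw [PySem.Set.ofList_eq_foldl]
  rfl

-- pvHasPairD is exactly "some adjacent position satisfies the guard"
theorem pv_haspair_iff (l : List Char) :
    pvHasPairD l = true ↔ ∃ j : Nat, ∃ h : j + 1 < l.length,
      (pvIsConsonantB l[j] && pvIsConsonantB (l[j + 1]'h) && (l[j] != l[j + 1]'h)) = true := by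
  induction l with
  | nil => simp [pvHasPairD]
  | cons c1 tl ih =>
    cases tl with
    | nil => simp [pvHasPairD]
    | cons c2 rest =>
      rw [pvHasPairD]
      rw [Bool.or_eq_true, pv_cond_eq, ih]
      constructor
      · rintro (h | ⟨j, hj, h⟩)
        · exact ⟨0, by simp, by simpa using h⟩
        · exact ⟨j + 1, by simpa using hj, by simpa using h⟩
      · rintro ⟨j, hj, h⟩
        cases j with
        | zero => exact Or.inl (by simpa using h)
        | succ j => exact Or.inr ⟨j, by simpa using hj, by simpa using h⟩

-- no guarded pair ⇒ no candidates at all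
theorem pv_cands_nil (word : String) (h : pvHasPairD (PySem.Chars.lower word.toList) = false) :
    (PySem.List.pyRange 0 (PySem.Str.len word - 1) 1).filterMap
      (pvCandB word.toList (PySem.Chars.lower word.toList)) = [] := by
  set cs := word.toList
  set wl := PySem.Chars.lower cs with hwl
  have hlen : wl.length = cs.length := by simp [hwl, PySem.Chars.lower]
  rw [List.filterMap_eq_nil_iff]
  intro i hi
  rw [PySem.List.mem_pyRange_one] at hi
  have hlt : i + 1 < (wl.length : Int) := by
    have : PySem.Str.len word = (cs.length : Int) := rfl
    omega
  have h0 : (0 : Int) ≤ i := hi.1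
  have g1 : PySem.List.pyGetD wl i ' ' = wl[i.toNat]'(by omega) :=
    PySem.List.pyGetD_eq_getElem wl ' ' h0 (by omega)
  have g2 : PySem.List.pyGetD wl (i + 1) ' ' = wl[i.toNat + 1]'(by omega) := by
    rw [PySem.List.pyGetD_eq_getElem wl ' ' (by omega) (by omega)]
    congr 1; omega
  rw [pvCandB, if_neg]
  intro hc
  rw [g1, g2] at hc
  have : pvHasPairD wl = true := (pv_haspair_iff wl).mpr ⟨i.toNat, by omega, hc⟩
  rw [h] at this
  exact absurd this (by simp)

-- ===== VERDICT (by name: the statement is the Claim_ definition above) =====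
set_option maxRecDepth 100000 in
theorem apply_consonant_swap_py_spec : Claim_unchanged_apply_consonant_swap_py := by
  intro word mv _ hD
  unfold D_apply_consonant_swap_py at hD
  by_cases hmv : 1 ≤ mv
  · rw [pv_a_eq word mv hmv, pv_b_eq]
    have : max mv 0 = mv := by omega
    rw [this]
  · have h1 : mv ≤ 0 := by omega
    have h2 : pvHasPairD (PySem.Chars.lower word.toList) = false := by
      cases hb : pvHasPairD (PySem.Chars.lower word.toList) with
      | false => rfl
      | true => exact absurd ⟨h1, (pv_D_iff word.toList).mpr hb⟩ hD
    rw [pv_a_sloop, pv_b_eq, pv_cands_nil word h2]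
    simp [pvSLoop, PySem.Set.ofList, PySem.Set.empty]

theorem apply_consonant_swap_py_changed : Claim_changed_apply_consonant_swap_py := by
  unfold Claim_changed_apply_consonant_swap_py
  exact ⟨by decide, ⟨by decide, (pv_D_iff "bc".toList).mpr (by decide)⟩,
    by decide, by decide, by decide⟩

theorem apply_consonant_swap_py_tight : Claim_exact_apply_consonant_swap_py := by
  intro word mv _ hD
  rcases hD with ⟨hmv, hpair'⟩
  have hpair : pvHasPairD (PySem.Chars.lower word.toList) = true :=
    (pv_D_iff word.toList).mp hpair' 
  have hB : apply_consonant_swap_py_alt word mv = [] := by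
    rw [pv_b_eq]
    have : max mv 0 = 0 := by omega
    rw [this]
    simp
  rw [hB]
  rcases (pv_haspair_iff _).mp hpair with ⟨j, hj, hc⟩
  have hlen : (PySem.Chars.lower word.toList).length = word.toList.length := by
    simp [PySem.Chars.lower]
  set cs := word.toList
  set wl := PySem.Chars.lower cs
  have hmem : (j : Int) ∈ PySem.List.pyRange 0 (PySem.Str.len word - 1) 1 := by
    rw [PySem.List.mem_pyRange_one]
    have : PySem.Str.len word = (cs.length : Int) := rfl
    omega
  have hsome : ∃ y, pvCandB cs wl (j : Int) = some y := by
    have g1 : PySem.List.pyGetD wl (j : Int) ' ' = wl[j]'(by omega) := by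
      rw [PySem.List.pyGetD_eq_getElem wl ' ' (by omega) (by omega)]
      simp only [show ((j : Int)).toNat = j from by omega]
    have g2 : PySem.List.pyGetD wl ((j : Int) + 1) ' ' = wl[j + 1]'(by omega) := by
      rw [PySem.List.pyGetD_eq_getElem wl ' ' (by omega) (by omega)]
      simp only [show ((j : Int) + 1).toNat = j + 1 from by omega]
    have hcond : (pvIsConsonantB (PySem.List.pyGetD wl (j : Int) ' ') &&
        pvIsConsonantB (PySem.List.pyGetD wl ((j : Int) + 1) ' ') &&
        (PySem.List.pyGetD wl (j : Int) ' ' != PySem.List.pyGetD wl ((j : Int) + 1) ' ')) = true := by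
      rw [g1, g2]; exact hc
    exact ⟨_, by rw [pvCandB, if_pos hcond]⟩
  have hCne : (PySem.List.pyRange 0 (PySem.Str.len word - 1) 1).filterMap (pvCandB cs wl) ≠ [] := by
    rcases hsome with ⟨y, hy⟩
    intro hnil
    rw [List.filterMap_eq_nil_iff] at hnil
    rw [hnil _ hmem] at hy
    exact absurd hy (by simp)
  rw [pv_a_sloop]
  rcases hx : (PySem.List.pyRange 0 (PySem.Str.len word - 1) 1).filterMap (pvCandB cs wl) with _ | ⟨c0, C⟩
  · exact absurd hx hCne
  · simp only [pvSLoop]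
    have hadd : PySem.Set.add PySem.Set.empty c0 = [c0] := by
      simp [PySem.Set.add, PySem.Set.empty]
    rw [hadd, if_pos (by simp [PySem.Set.len]; omega)]
    simp
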